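-- pv_equiv track=rewrite | github.com/Pydjama3/AdventOfCode2024 | Day 1/main.py | func_part_ii
-- ===== SOURCE A (Python) =====
-- def func_part_ii(_input):
--     n = len(_input)
--
--     registry = {}
--     existing = []
--     for i in range(n):
--         left, right = _input[i]
--
--         existing.append(left)
--         registry[right] = registry.get(right, 0) + 1
--
--     tot = 0
--     for identity in existing:
--         tot += identity * registry.get(identity, 0)
--
--     return tot
-- ===== SOURCE B (Python) =====
-- def func_part_ii(_input):
--     lefts = []
--     rights = []
--     for left, right in _input:
--         lefts.append(left)
--         rights.append(right)
--     rights.sort()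
--
--     def bisect_left(a, x):
--         lo, hi = 0, len(a)
--         while lo < hi:
--             mid = (lo + hi) // 2
--             if a[mid] < x:
--                 lo = mid + 1
--             else:
--                 hi = mid
--         return lo
--
--     def bisect_right(a, x):
--         lo, hi = 0, len(a)
--         while lo < hi:
--             mid = (lo + hi) // 2
--             if x < a[mid]:
--                 hi = mid
--             else:
--                 lo = mid + 1
--         return lo
--
--     total = 0
--     for v in lefts:
--         total += v * (bisect_right(rights, v) - bisect_left(rights, v))
--     return total
-- ===== Notes on version B (the rewrite author's own statement) =====
-- stated objective: alternative
-- what changed: Replaces A's frequency-dictionary (build counts, then look up each left value) by a sorted-array representation: the right values are sorted once and each left value's multiplicity is obtained as bisect_right - bisect_left via binary search.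
import Mathlib
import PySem

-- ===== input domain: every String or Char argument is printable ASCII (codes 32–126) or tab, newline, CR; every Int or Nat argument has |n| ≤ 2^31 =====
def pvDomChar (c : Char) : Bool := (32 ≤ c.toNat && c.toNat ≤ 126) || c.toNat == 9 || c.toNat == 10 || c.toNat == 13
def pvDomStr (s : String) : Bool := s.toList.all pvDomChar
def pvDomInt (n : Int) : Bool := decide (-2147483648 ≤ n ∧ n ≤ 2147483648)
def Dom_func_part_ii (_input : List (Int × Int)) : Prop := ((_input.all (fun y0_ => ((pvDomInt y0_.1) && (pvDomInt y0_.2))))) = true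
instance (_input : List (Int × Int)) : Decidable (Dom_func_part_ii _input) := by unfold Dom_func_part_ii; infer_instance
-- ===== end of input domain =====

-- B replaces A's frequency dict by a sorted copy of the right values queried with
-- binary search (bisect_right - bisect_left) — objective: alternative data structure.
-- ===== PORT A =====
def func_part_ii (_input : List (Int × Int)) : Int :=
  let n : Int := (_input.length : Int)
  let st := (PySem.List.pyRange 0 n 1).foldl
    (fun (acc : List Int × PySem.Dict Int Int) i =>
      let p := PySem.List.pyGetD _input i (0, 0)
      (acc.1 ++ [p.1], acc.2.insert p.2 (acc.2.getD p.2 0 + 1)))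
    ([], PySem.Dict.empty)
  st.1.foldl (fun tot identity => tot + identity * st.2.getD identity 0) 0

-- ===== PORT B =====
-- the two hand-written binary searches in Source B are the standard bisect loops,
-- which PySem.List.bisectLeft / bisectRight transcribe step for step
def func_part_ii_alt (_input : List (Int × Int)) : Int :=
  let st := _input.foldl
    (fun (acc : List Int × List Int) p => (acc.1 ++ [p.1], acc.2 ++ [p.2])) ([], [])
  let srights := PySem.List.sorted st.2 (fun x => x) false
  st.1.foldl
    (fun tot v =>
      tot + v * ((PySem.List.bisectRight srights v : Int) - (PySem.List.bisectLeft srights v : Int)))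
    0

-- ===== PRECONDITION & SPEC =====
def Spec_func_part_ii (_input : List (Int × Int)) (out : Int) : Prop := out = func_part_ii_alt _input
instance (_input : List (Int × Int)) (out : Int) : Decidable (Spec_func_part_ii _input out) := by unfold Spec_func_part_ii; infer_instance

-- ===== CLAIM =====
def Claim_equal_func_part_ii : Prop := ∀ (_input : List (Int × Int)), Dom_func_part_ii _input → Spec_func_part_ii _input (func_part_ii _input)

-- ===== LEMMAS AND PROOFS =====

-- countP (≤ v) splits into countP (< v) plus the multiplicity of v (any list)
theorem pv_countP_le_split (s : List Int) (v : Int) :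
    s.countP (fun x => decide (x ≤ v)) = s.countP (fun x => decide (x < v)) + s.count v := by
  induction s with
  | nil => simp
  | cons a t ih =>
    simp only [List.countP_cons, List.count_cons, ih]
    rcases lt_trichotomy a v with h | h | h
    · simp [h, h.le, h.ne]; omega
    · simp [h]; omega
    · simp [not_le.mpr h, not_lt.mpr h.le, h.ne']

-- on a sorted list, bisect_left is the number of elements < v
theorem pv_bisectLeft_eq_countP (s : List Int) (v : Int)
    (hs : s.Pairwise (fun a b => a ≤ b)) :
    s.countP (fun x => decide (x < v)) = PySem.List.bisectLeft s v := by
  obtain ⟨hle, hlt, hge⟩ := PySem.List.bisectLeft_spec s v hs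
  set k := PySem.List.bisectLeft s v with hk
  conv_lhs => rw [← List.take_append_drop k s]
  rw [List.countP_append]
  have h1 : (s.take k).countP (fun x => decide (x < v)) = k := by
    rw [List.countP_eq_length.mpr, List.length_take_of_le hle]
    intro a ha
    obtain ⟨i, hi, rfl⟩ := List.getElem_of_mem ha
    have hik : i < k := by simpa [List.length_take, hle] using hi
    rw [List.getElem_take]
    exact decide_eq_true (hlt i (lt_of_lt_of_le hik hle) hik)
  have h2 : (s.drop k).countP (fun x => decide (x < v)) = 0 := by
    rw [List.countP_eq_zero]
    intro a ha
    obtain ⟨i, hi, rfl⟩ := List.getElem_of_mem ha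
    rw [List.getElem_drop]
    have := hge (k + i) (by simp only [List.length_drop] at hi; omega) (Nat.le_add_right _ _)
    simpa using not_lt.mpr this
  omega

-- on a sorted list, bisect_right is the number of elements ≤ v
theorem pv_bisectRight_eq_countP (s : List Int) (v : Int)
    (hs : s.Pairwise (fun a b => a ≤ b)) :
    s.countP (fun x => decide (x ≤ v)) = PySem.List.bisectRight s v := by
  obtain ⟨hle, hlt, hge⟩ := PySem.List.bisectRight_spec s v hs
  set k := PySem.List.bisectRight s v with hk
  conv_lhs => rw [← List.take_append_drop k s]
  rw [List.countP_append]
  have h1 : (s.take k).countP (fun x => decide (x ≤ v)) = k := by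
    rw [List.countP_eq_length.mpr, List.length_take_of_le hle]
    intro a ha
    obtain ⟨i, hi, rfl⟩ := List.getElem_of_mem ha
    have hik : i < k := by simpa [List.length_take, hle] using hi
    rw [List.getElem_take]
    exact decide_eq_true (hlt i (lt_of_lt_of_le hik hle) hik)
  have h2 : (s.drop k).countP (fun x => decide (x ≤ v)) = 0 := by
    rw [List.countP_eq_zero]
    intro a ha
    obtain ⟨i, hi, rfl⟩ := List.getElem_of_mem ha
    rw [List.getElem_drop]
    have := hge (k + i) (by simp only [List.length_drop] at hi; omega) (Nat.le_add_right _ _)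
    simpa using not_le.mpr this
  omega

-- the bisect difference on sorted rights is the multiplicity of v in rights
theorem pv_bisect_diff_eq_count (rights : List Int) (v : Int) :
    (PySem.List.bisectRight (PySem.List.sorted rights (fun x => x) false) v : Int) -
      (PySem.List.bisectLeft (PySem.List.sorted rights (fun x => x) false) v : Int) =
    (rights.count v : Int) := by
  set s := PySem.List.sorted rights (fun x => x) false with hsdef
  have hs : s.Pairwise (fun a b => a ≤ b) := by
    simpa using PySem.List.sorted_pairwise rights (fun x => x)
  have hcnt : s.count v = rights.count v :=
    (PySem.List.sorted_perm rights (fun x => x) false).count_eq v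
  have h := pv_countP_le_split s v
  rw [pv_bisectLeft_eq_countP s v hs, pv_bisectRight_eq_countP s v hs, hcnt] at h
  omega

-- ===== VERDICT =====
theorem func_part_ii_spec : Claim_equal_func_part_ii := by
  intro xs _
  unfold Spec_func_part_ii func_part_ii func_part_ii_alt
  simp only []
  rw [PySem.List.foldl_pyRange_zero_pyGetD' xs (0,0)
        (fun (acc : List Int × PySem.Dict Int Int) p =>
          (acc.1 ++ [p.1], acc.2.insert p.2 (acc.2.getD p.2 0 + 1))) ([], PySem.Dict.empty)]
  rw [PySem.List.foldl_prod_mk (f := fun (a : List Int) (p : Int × Int) => a ++ [p.1])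
        (g := fun (d : PySem.Dict Int Int) (p : Int × Int) => d.insert p.2 (d.getD p.2 0 + 1))
        (l := xs)]
  rw [PySem.List.foldl_prod_mk (f := fun (a : List Int) (p : Int × Int) => a ++ [p.1])
        (g := fun (a : List Int) (p : Int × Int) => a ++ [p.2])
        (l := xs)]
  simp only [PySem.List.foldl_append_singleton_eq_map, List.nil_append]
  rw [show (xs.foldl (fun (d : PySem.Dict Int Int) p => d.insert p.2 (d.getD p.2 0 + 1))
        PySem.Dict.empty)
      = PySem.Dict.counter (xs.map (fun p => p.2)) from by
        rw [← PySem.Dict.foldl_insert_getD_add_one_eq_counter, List.foldl_map]]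
  rw [PySem.List.foldl_add (g := fun v =>
        v * (PySem.Dict.counter (xs.map (fun p => p.2))).getD v 0)]
  rw [PySem.List.foldl_add (g := fun v =>
        v * ((PySem.List.bisectRight (PySem.List.sorted (xs.map (fun p => p.2)) (fun x => x) false) v : Int)
           - (PySem.List.bisectLeft (PySem.List.sorted (xs.map (fun p => p.2)) (fun x => x) false) v : Int)))]
  simp only [pv_bisect_diff_eq_count, PySem.Dict.getD_counter]
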